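-- pv_equiv track=rewrite | github.com/SriharshithaSadhu/nl2sql | core.py | _find_join_path
-- ===== SOURCE A (Python) =====
-- from typing import Dict, List, Tuple, Optional
--
-- def _find_join_path(graph: Dict[str, List[Tuple[str, Tuple[str, str]]]], start: str, targets: List[str]) -> Optional[List[str]]:
--     """Find a simple path from start that covers all targets (greedy BFS).
--     Returns list of tables in join order including start.
--     """
--     from collections import deque
--     targets_set = set(targets)
--     if not targets_set:
--         return None
--     # BFS to each target sequentially, accumulating path.
--     path = [start]
--     current = start
--     remaining = [t for t in targets if t != start]
--     while remaining:
--         goal = remaining[0]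
--         # BFS from current to goal
--         prev: Dict[str, Optional[str]] = {current: None}
--         q = deque([current])
--         found = False
--         while q and not found:
--             node = q.popleft()
--             for neigh, _cols in graph.get(node, []):
--                 if neigh not in prev:
--                     prev[neigh] = node
--                     if neigh == goal:
--                         found = True
--                         break
--                     q.append(neigh)
--         if not found:
--             return None
--         # reconstruct
--         chain = []
--         n = goal
--         while n is not None:
--             chain.append(n)
--             n = prev[n]
--         chain.reverse()
--         # append chain excluding current duplicate
--         for t in chain[1:]:
--             path.append(t)
--         current = goal
--         remaining.pop(0)
--     return path
-- ===== SOURCE B (Python) =====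
-- from typing import Dict, List, Tuple, Optional
--
-- def _find_join_path(graph: Dict[str, List[Tuple[str, Tuple[str, str]]]], start: str, targets: List[str]) -> Optional[List[str]]:
--     """Level-synchronized full BFS: per hop compute the complete first-discoverer
--     map of the reachable component (no early break, no deque), then test the goal
--     by dict membership and rebuild the chain front-to-back by recursion."""
--     if not targets:
--         return None
--
--     def parents_from(src):
--         # first-discoverer map of everything reachable from src (src excluded)
--         parent = {}
--         seen = {src}
--         frontier = [src]
--         while frontier:
--             nxt = []
--             for node in frontier:
--                 for neigh, _cols in graph.get(node, []):
--                     if neigh not in seen: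
--                         seen.add(neigh)
--                         parent[neigh] = node
--                         nxt.append(neigh)
--             frontier = nxt
--         return parent
--
--     def chain(parent, n):
--         p = parent.get(n)
--         return [n] if p is None else chain(parent, p) + [n]
--
--     path = [start]
--     current = start
--     for goal in (t for t in targets if t != start):
--         parent = parents_from(current)
--         if goal not in parent:
--             return None
--         path += chain(parent, goal)[1:]
--         current = goal
--     return path
-- ===== Notes on version B (the rewrite author's own statement) =====
-- stated objective: alternative
-- what changed: Each inner search is replaced wholesale: instead of an early-breaking deque BFS over a prev-dict with a found flag and a backward reconstruction loop, B runs a level-synchronized full BFS that computes the complete first-discoverer map of the reachable component, tests the goal by dict membership, and rebuilds the chain front-to-back by a recursive function.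
import Mathlib
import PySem

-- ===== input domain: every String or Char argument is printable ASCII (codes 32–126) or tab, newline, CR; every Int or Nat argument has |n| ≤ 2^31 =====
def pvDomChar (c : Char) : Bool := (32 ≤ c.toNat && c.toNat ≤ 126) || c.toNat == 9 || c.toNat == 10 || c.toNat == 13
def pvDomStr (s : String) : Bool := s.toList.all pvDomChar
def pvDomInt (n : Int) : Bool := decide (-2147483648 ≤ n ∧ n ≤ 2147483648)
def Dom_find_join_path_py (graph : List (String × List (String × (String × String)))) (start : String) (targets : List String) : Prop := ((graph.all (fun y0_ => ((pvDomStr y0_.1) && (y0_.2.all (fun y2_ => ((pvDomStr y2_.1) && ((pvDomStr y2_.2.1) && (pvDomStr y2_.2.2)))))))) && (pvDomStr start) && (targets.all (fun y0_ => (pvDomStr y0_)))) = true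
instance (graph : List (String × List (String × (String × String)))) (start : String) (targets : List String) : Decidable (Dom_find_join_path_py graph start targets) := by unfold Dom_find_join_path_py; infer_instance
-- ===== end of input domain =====

-- B replaces A's early-breaking deque BFS (prev-dict + found flag + backward chain
-- reconstruction) by a level-synchronized FULL BFS that computes the complete
-- first-discoverer map of the reachable component, then tests the goal by dict
-- membership and rebuilds the chain front-to-back by recursion. Alternative, not faster.

-- shared: graph.get(node, []) on the graph dict
def pvGGet (graph : List (String × List (String × (String × String)))) (node : String) :
    List (String × (String × String)) :=
  (PySem.Dict.mk graph).getD node []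

-- fuel for the while-loops (a Lean totality artifact only: proved sufficient below,
-- the ports never truncate)
def pvFuel (graph : List (String × List (String × (String × String)))) : Nat :=
  1 + (graph.map (fun e => e.2.length)).sum

-- ===== PORT A =====
-- inner 'for neigh, _cols in graph.get(node, [])' loop of A (break on goal sets found)
def stepA (goal node : String) :
    List (String × (String × String)) → PySem.Dict String (Option String) → List String →
    PySem.Dict String (Option String) × List String × Bool
  | [], prev, q => (prev, q, false)
  | (neigh, _cols) :: rest, prev, q =>
    if prev.contains neigh then stepA goal node rest prev q
    else
      let prev' := prev.insert neigh (some node)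
      if neigh == goal then (prev', q, true)
      else stepA goal node rest prev' (q ++ [neigh])

-- A's 'while q and not found' loop
def bfsA (graph : List (String × List (String × (String × String)))) (goal : String) :
    Nat → List String → PySem.Dict String (Option String) →
    Option (PySem.Dict String (Option String))
  | _, [], _ => none
  | 0, _ :: _, _ => none
  | fuel + 1, node :: q, prev =>
    match stepA goal node (pvGGet graph node) prev q with
    | (prev', _, true) => some prev'
    | (prev', q', false) => bfsA graph goal fuel q' prev'

-- A's reconstruction loop 'while n is not None: chain.append(n); n = prev[n]'
-- (the key is always present in prev on reachable states; getD's default is never hit)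
def recA (prev : PySem.Dict String (Option String)) :
    Nat → Option String → List String → List String
  | _, none, chain => chain
  | 0, some _, chain => chain
  | fuel + 1, some n, chain => recA prev fuel (prev.getD n none) (chain ++ [n])

-- A's 'while remaining' loop
def outerA (graph : List (String × List (String × (String × String)))) :
    List String → List String → String → Option (List String)
  | [], path, _ => some path
  | goal :: rest, path, current =>
    let prev0 := (PySem.Dict.empty : PySem.Dict String (Option String)).insert current none
    match bfsA graph goal (pvFuel graph) [current] prev0 with
    | none => none
    | some prev' =>
      let chain := (recA prev' prev'.size (some goal) []).reverse
      outerA graph rest (path ++ chain.drop 1) goal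

def find_join_path_py (graph : List (String × List (String × (String × String)))) (start : String) (targets : List String) : Option (List String) :=
  if (PySem.Set.ofList targets).isEmpty then none
  else outerA graph (targets.filter (fun t => t ≠ start)) [start] start

-- ===== PORT B =====
-- body of B's innermost 'if neigh not in seen' discovery step; state (parent, seen, nxt)
def discB (node : String)
    (st : PySem.Dict String String × PySem.Set String × List String)
    (e : String × (String × String)) :
    PySem.Dict String String × PySem.Set String × List String :=
  if PySem.Set.contains st.2.1 e.1 then st
  else (st.1.insert e.1 node, PySem.Set.add st.2.1 e.1, st.2.2 ++ [e.1])

-- B's 'for neigh, _cols in graph.get(node, [])' loop for one frontier node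
def levelStep (graph : List (String × List (String × (String × String))))
    (st : PySem.Dict String String × PySem.Set String × List String) (node : String) :
    PySem.Dict String String × PySem.Set String × List String :=
  (pvGGet graph node).foldl (discB node) st

-- B's 'while frontier' loop of parents_from: one recursive step per BFS level
def bfsLevels (graph : List (String × List (String × (String × String)))) :
    Nat → List String → PySem.Dict String String → PySem.Set String →
    PySem.Dict String String
  | _, [], parent, _ => parent
  | 0, _ :: _, parent, _ => parent
  | fuel + 1, frontier, parent, seen =>
    match frontier.foldl (levelStep graph) (parent, seen, []) with
    | (parent', seen', nxt) => bfsLevels graph fuel nxt parent' seen'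

-- B's recursive 'chain(parent, n)' (front-to-back)
def chainB (parent : PySem.Dict String String) : Nat → String → List String
  | 0, n => [n]
  | fuel + 1, n =>
    match parent.get? n with
    | none => [n]
    | some p => chainB parent fuel p ++ [n]

-- B's 'for goal in (t for t in targets if t != start)' loop
def outerB (graph : List (String × List (String × (String × String)))) :
    List String → List String → String → Option (List String)
  | [], path, _ => some path
  | goal :: rest, path, current =>
    let parent := bfsLevels graph (pvFuel graph) [current] PySem.Dict.empty
      (PySem.Set.add PySem.Set.empty current)
    if parent.contains goal then
      outerB graph rest (path ++ (chainB parent parent.size goal).drop 1) goal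
    else none

def find_join_path_py_alt (graph : List (String × List (String × (String × String)))) (start : String) (targets : List String) : Option (List String) :=
  if targets.isEmpty then none
  else outerB graph (targets.filter (fun t => t ≠ start)) [start] start

-- ===== PRECONDITION & SPEC =====
def Spec_find_join_path_py (graph : List (String × List (String × (String × String)))) (start : String) (targets : List String) (out : Option (List String)) : Prop := out = find_join_path_py_alt graph start targets
instance (graph : List (String × List (String × (String × String)))) (start : String) (targets : List String) (out : Option (List String)) : Decidable (Spec_find_join_path_py graph start targets out) := by unfold Spec_find_join_path_py; infer_instance

-- ===== CLAIM (what is proved, stated in full; the proofs are below) =====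
def Claim_equal_find_join_path_py : Prop := ∀ (graph : List (String × List (String × (String × String)))) (start : String) (targets : List String), Dom_find_join_path_py graph start targets → Spec_find_join_path_py graph start targets (find_join_path_py graph start targets)

-- ===== LEMMAS AND PROOFS =====

inductive Trace (prev : PySem.Dict String (Option String)) : List String → String → Prop
  | base (x : String) : prev.get? x = some none → Trace prev [x] x
  | step (p : List String) (x y : String) :
      Trace prev p x → prev.get? y = some (some x) → Trace prev (p ++ [y]) y

theorem trace_subset {prev : PySem.Dict String (Option String)} {p : List String} {x : String}
    (h : Trace prev p x) : ∀ y ∈ p, prev.contains y = true := by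
  induction h with
  | base x hx => intro y hy; simp at hy; subst hy
                 simp [PySem.Dict.contains_eq_isSome_get?, hx]
  | step p x y _ hy ih =>
      intro z hz
      rcases List.mem_append.1 hz with h1 | h1
      · exact ih z h1
      · simp at h1; subst h1; simp [PySem.Dict.contains_eq_isSome_get?, hy]

theorem trace_mono {prev : PySem.Dict String (Option String)} {p : List String} {x : String}
    (h : Trace prev p x) (k : String) (v : Option String) (hk : prev.contains k = false) :
    Trace (prev.insert k v) p x := by
  induction h with
  | base x hx =>
      refine Trace.base x ?_
      rw [PySem.Dict.get?_insert_of_ne]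
      · exact hx
      · intro he; subst he
        rw [PySem.Dict.contains_eq_isSome_get?, hx] at hk; simp at hk
  | step p x y ht hy ih =>
      refine Trace.step p x y ih ?_
      rw [PySem.Dict.get?_insert_of_ne]
      · exact hy
      · intro he; subst he
        rw [PySem.Dict.contains_eq_isSome_get?, hy] at hk; simp at hk

theorem trace_recA {prev : PySem.Dict String (Option String)} {p : List String} {x : String}
    (h : Trace prev p x) : ∀ (acc : List String) (fuel : Nat), p.length ≤ fuel →
    recA prev fuel (some x) acc = acc ++ p.reverse := by
  induction h with
  | base x hx =>
      intro acc fuel hf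
      cases fuel with
      | zero => simp at hf
      | succ fuel => simp [recA, PySem.Dict.getD_eq_get?_getD, hx]
  | step p x y ht hy ih =>
      intro acc fuel hf
      cases fuel with
      | zero => simp at hf
      | succ fuel =>
        have hf' : p.length ≤ fuel := by simp at hf; omega
        simp [recA, PySem.Dict.getD_eq_get?_getD, hy, ih (acc ++ [y]) fuel hf']

theorem set_contains_add (s : PySem.Set String) (y x : String) :
    PySem.Set.contains (PySem.Set.add s y) x = (x == y || PySem.Set.contains s x) := by
  rw [Bool.eq_iff_iff]
  simp only [Bool.or_eq_true, beq_iff_eq, PySem.Set.contains_iff, PySem.Set.mem_add]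
  tauto


-- the simulation relation between A's prev-dict and B's (parent, seen)
def RepAB (prev : PySem.Dict String (Option String)) (parent : PySem.Dict String String)
    (seen : PySem.Set String) : Prop :=
  (∀ x, PySem.Set.contains seen x = prev.contains x) ∧
  (∀ x, parent.get? x = (prev.get? x).bind id)

-- every queue element has a recorded simple BFS-tree path
def QTrace (prev : PySem.Dict String (Option String)) (q : List String) : Prop :=
  ∀ n ∈ q, ∃ p, Trace prev p n ∧ p.Nodup

-- all strings that can ever be discovered (distinct neighbour names of the graph)
def allN (graph : List (String × List (String × (String × String)))) : List String :=
  ((graph.flatMap (fun e => e.2)).map (fun e => e.1)).dedup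

-- number of not-yet-seen discoverable strings
def remN (graph : List (String × List (String × (String × String))))
    (s : PySem.Set String) : Nat :=
  ((allN graph).filter (fun x => ! PySem.Set.contains s x)).length

-- sequential (one node at a time) formulation of B's full BFS, used only by the proofs
def seqS (graph : List (String × List (String × (String × String)))) :
    Nat → List String → PySem.Dict String String → PySem.Set String →
    PySem.Dict String String
  | _, [], parent, _ => parent
  | 0, _ :: _, parent, _ => parent
  | fuel + 1, node :: q, parent, seen =>
    match levelStep graph (parent, seen, q) node with
    | (parent', seen', q') => seqS graph fuel q' parent' seen'

theorem mk_mem (g : List (String × List (String × (String × String)))) (x : String)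
    (l : List (String × (String × String))) (h : (PySem.Dict.mk g).get? x = some l) :
    (x, l) ∈ g := by
  induction g with
  | nil =>
      rw [show (PySem.Dict.mk ([] : List (String × List (String × (String × String)))))
            = PySem.Dict.empty from rfl, PySem.Dict.get?_empty] at h
      exact absurd h (by simp)
  | cons hd tl ih =>
      obtain ⟨k, v⟩ := hd
      rw [PySem.Dict.get?_mk_cons] at h
      by_cases hk : k == x
      · simp [hk] at h; subst h
        have : k = x := by simpa using hk
        subst this; exact List.mem_cons_self ..
      · simp [hk] at h
        exact List.mem_cons_of_mem _ (ih h)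

theorem nb_mem (graph : List (String × List (String × (String × String)))) (node : String)
    (e : String × (String × String)) (he : e ∈ pvGGet graph node) : e.1 ∈ allN graph := by
  unfold pvGGet at he
  rw [PySem.Dict.getD_eq_get?_getD] at he
  cases hg : (PySem.Dict.mk graph).get? node with
  | none => rw [hg] at he; simp at he
  | some l =>
      rw [hg] at he; simp at he
      have hm := mk_mem graph node l hg
      unfold allN
      rw [List.mem_dedup]
      exact List.mem_map.2 ⟨e, List.mem_flatMap.2 ⟨(node, l), hm, he⟩, rfl⟩

theorem remN_add (graph : List (String × List (String × (String × String))))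
    (s : PySem.Set String) (a : String) (ha : a ∈ allN graph)
    (hs : PySem.Set.contains s a = false) :
    remN graph (PySem.Set.add s a) + 1 ≤ remN graph s := by
  unfold remN
  have h1 : (allN graph).filter (fun x => ! PySem.Set.contains (PySem.Set.add s a) x)
      = ((allN graph).filter (fun x => ! PySem.Set.contains s x)).filter (fun x => x != a) := by
    rw [List.filter_filter]
    apply List.filter_congr
    intro x _
    rw [set_contains_add]
    cases hxa : x == a <;> cases hsx : PySem.Set.contains s x <;>
      simp_all [bne]
  rw [h1]
  have hnd : ((allN graph).filter (fun x => ! PySem.Set.contains s x)).Nodup :=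
    (List.nodup_dedup _).filter _
  have hns : a ∉ s := by
    intro h; rw [(PySem.Set.contains_iff s a).2 h] at hs; cases hs
  have hmem : a ∈ (allN graph).filter (fun x => ! PySem.Set.contains s x) :=
    List.mem_filter.2 ⟨ha, by simpa using hns⟩
  have h2 := List.Nodup.erase_eq_filter hnd a
  rw [← h2, List.length_erase_of_mem hmem]
  have := List.length_pos_of_mem hmem
  omega

theorem remN_le (graph : List (String × List (String × (String × String))))
    (s : PySem.Set String) : remN graph s + 1 ≤ pvFuel graph := by
  unfold remN pvFuel
  have h1 : ((allN graph).filter (fun x => ! PySem.Set.contains s x)).length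
      ≤ (allN graph).length := List.length_filter_le _ _
  have h2 : (allN graph).length
      ≤ ((graph.flatMap (fun e => e.2)).map (fun e => e.1)).length :=
    (List.dedup_sublist _).length_le
  have h3 : (graph.flatMap (fun e => e.2)).length = (graph.map (fun e => e.2.length)).sum := by
    rw [List.length_flatMap]
  simp only [List.length_map] at h2
  omega

theorem discB_seen (node : String) (p : PySem.Dict String String) (s : PySem.Set String)
    (x : List String) (e : String × (String × String))
    (hc : PySem.Set.contains s e.1 = true) : discB node (p, s, x) e = (p, s, x) := by
  unfold discB; rw [hc]; simp

theorem discB_fresh (node : String) (p : PySem.Dict String String) (s : PySem.Set String)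
    (x : List String) (e : String × (String × String))
    (hc : PySem.Set.contains s e.1 = false) :
    discB node (p, s, x) e = (p.insert e.1 node, PySem.Set.add s e.1, x ++ [e.1]) := by
  unfold discB; rw [hc]; simp

theorem disc_shift (node : String) (l : List (String × (String × String))) :
    ∀ (p : PySem.Dict String String) (s : PySem.Set String) (x : List String),
    l.foldl (discB node) (p, s, x) =
      ((l.foldl (discB node) (p, s, [])).1,
       (l.foldl (discB node) (p, s, [])).2.1,
       x ++ (l.foldl (discB node) (p, s, [])).2.2) := by
  induction l with
  | nil => intro p s x; simp
  | cons e rest ih =>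
      intro p s x
      simp only [List.foldl_cons]
      cases hc : PySem.Set.contains s e.1 with
      | true => rw [discB_seen node p s x e hc, discB_seen node p s [] e hc]; exact ih p s x
      | false =>
          rw [discB_fresh node p s x e hc, discB_fresh node p s [] e hc]
          simp only [List.nil_append]
          rw [ih (p.insert e.1 node) _ (x ++ [e.1]), ih (p.insert e.1 node) _ [e.1]]
          simp

theorem fold_stable (node : String) (l : List (String × (String × String))) :
    ∀ (p : PySem.Dict String String) (s : PySem.Set String) (q : List String) (x : String),
    PySem.Set.contains s x = true →
    (l.foldl (discB node) (p, s, q)).1.get? x = p.get? x ∧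
    PySem.Set.contains (l.foldl (discB node) (p, s, q)).2.1 x = true := by
  induction l with
  | nil => intro p s q x hx; exact ⟨rfl, hx⟩
  | cons e rest ih =>
      intro p s q x hx
      simp only [List.foldl_cons]
      cases hc : PySem.Set.contains s e.1 with
      | true => rw [discB_seen node p s q e hc]; exact ih p s q x hx
      | false =>
          rw [discB_fresh node p s q e hc]
          have hne : x ≠ e.1 := by rintro rfl; rw [hx] at hc; cases hc
          have hx' : PySem.Set.contains (PySem.Set.add s e.1) x = true := by
            rw [set_contains_add, hx]; simp
          obtain ⟨h1, h2⟩ := ih (p.insert e.1 node) _ (q ++ [e.1]) x hx'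
          refine ⟨?_, h2⟩
          rw [h1, PySem.Dict.get?_insert_of_ne]
          exact hne

theorem fold_rem (graph : List (String × List (String × (String × String))))
    (node : String) (l : List (String × (String × String)))
    (hl : ∀ e ∈ l, e.1 ∈ allN graph) :
    ∀ (p : PySem.Dict String String) (s : PySem.Set String) (q : List String),
    remN graph (l.foldl (discB node) (p, s, q)).2.1 +
      ((l.foldl (discB node) (p, s, q)).2.2).length ≤ remN graph s + q.length := by
  induction l with
  | nil => intro p s q; simp
  | cons e rest ih =>
      intro p s q
      simp only [List.foldl_cons]
      have hl' : ∀ e ∈ rest, e.1 ∈ allN graph := fun e he => hl e (List.mem_cons_of_mem _ he)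
      cases hc : PySem.Set.contains s e.1 with
      | true => rw [discB_seen node p s q e hc]; exact ih hl' p s q
      | false =>
          rw [discB_fresh node p s q e hc]
          have h1 := ih hl' (p.insert e.1 node) (PySem.Set.add s e.1) (q ++ [e.1])
          have h2 := remN_add graph s e.1 (hl e (List.mem_cons_self ..)) hc
          simp at h1
          omega

theorem level_rem (graph : List (String × List (String × (String × String))))
    (f : List String) :
    ∀ (p : PySem.Dict String String) (s : PySem.Set String) (q : List String),
    remN graph (f.foldl (levelStep graph) (p, s, q)).2.1 +
      ((f.foldl (levelStep graph) (p, s, q)).2.2).length ≤ remN graph s + q.length := by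
  induction f with
  | nil => intro p s q; simp
  | cons n rest ih =>
      intro p s q
      simp only [List.foldl_cons]
      rcases hst : levelStep graph (p, s, q) n with ⟨p1, s1, q1⟩
      have h2 : remN graph s1 + q1.length ≤ remN graph s + q.length := by
        have h3 := fold_rem graph n (pvGGet graph n) (fun e he => nb_mem graph n e he) p s q
        have h4 : (pvGGet graph n).foldl (discB n) (p, s, q) = (p1, s1, q1) := hst
        rw [h4] at h3
        exact h3
      have h1 := ih p1 s1 q1
      omega

theorem seq_stable (graph : List (String × List (String × (String × String)))) :
    ∀ (fuel : Nat) (q : List String) (p : PySem.Dict String String) (s : PySem.Set String)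
      (x : String), PySem.Set.contains s x = true →
    (seqS graph fuel q p s).get? x = p.get? x := by
  intro fuel
  induction fuel with
  | zero => intro q p s x hx; cases q <;> rfl
  | succ fuel ih =>
      intro q p s x hx
      cases q with
      | nil => rfl
      | cons n q' =>
          simp only [seqS]
          rcases hst : levelStep graph (p, s, q') n with ⟨p1, s1, q1⟩
          have h3 := fold_stable n (pvGGet graph n) p s q' x hx
          have h4 : (pvGGet graph n).foldl (discB n) (p, s, q') = (p1, s1, q1) := hst
          rw [h4] at h3
          rw [ih q1 p1 s1 x h3.2, h3.1]

theorem seq_block (graph : List (String × List (String × (String × String))))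
    (f : List String) :
    ∀ (q : List String) (p : PySem.Dict String String) (s : PySem.Set String) (fuel : Nat),
    seqS graph (fuel + f.length) (f ++ q) p s =
      (match f.foldl (levelStep graph) (p, s, q) with
       | (p', s', q') => seqS graph fuel q' p' s') := by
  induction f with
  | nil => intro q p s fuel; simp
  | cons n f' ih =>
      intro q p s fuel
      simp only [List.foldl_cons, List.cons_append, List.length_cons]
      have hplus : fuel + (f'.length + 1) = (fuel + f'.length) + 1 := by omega
      rw [hplus]
      simp only [seqS]
      have h1 : levelStep graph (p, s, f' ++ q) n =
          ((levelStep graph (p, s, []) n).1, (levelStep graph (p, s, []) n).2.1,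
           (f' ++ q) ++ (levelStep graph (p, s, []) n).2.2) :=
        disc_shift n _ p s (f' ++ q)
      have h2 : levelStep graph (p, s, q) n =
          ((levelStep graph (p, s, []) n).1, (levelStep graph (p, s, []) n).2.1,
           q ++ (levelStep graph (p, s, []) n).2.2) :=
        disc_shift n _ p s q
      rw [h1, h2]
      have h3 : (f' ++ q) ++ (levelStep graph (p, s, []) n).2.2
          = f' ++ (q ++ (levelStep graph (p, s, []) n).2.2) := by simp
      rw [h3]
      exact ih (q ++ (levelStep graph (p, s, []) n).2.2) _ _ fuel

theorem trace_one_le {prev : PySem.Dict String (Option String)} {p : List String} {x : String}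
    (h : Trace prev p x) : 1 ≤ p.length := by
  cases h <;> simp

theorem levels_eq_seq (graph : List (String × List (String × (String × String)))) :
    ∀ (fuelL : Nat) (f : List String) (p : PySem.Dict String String)
      (s : PySem.Set String) (fuelS : Nat),
    1 + remN graph s ≤ fuelL → f.length + remN graph s ≤ fuelS →
    bfsLevels graph fuelL f p s = seqS graph fuelS f p s := by
  intro fuelL
  induction fuelL with
  | zero => intro f p s fuelS h1 h2; omega
  | succ L ih =>
      intro f p s fuelS h1 h2
      cases f with
      | nil => cases fuelS <;> rfl
      | cons n f' =>
          simp only [bfsLevels]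
          have hlen : (n :: f').length ≤ fuelS := by
            have := Nat.zero_le (remN graph s); simp at h2 ⊢; omega
          have hfs : fuelS = (fuelS - (n :: f').length) + (n :: f').length := by omega
          have hblock := seq_block graph (n :: f') [] p s (fuelS - (n :: f').length)
          rw [List.append_nil] at hblock
          rw [hfs, hblock]
          rcases hb : (n :: f').foldl (levelStep graph) (p, s, []) with ⟨p1, s1, nxt⟩
          have hrem0 := level_rem graph (n :: f') p s []
          rw [hb] at hrem0
          have hrem : remN graph s1 + nxt.length ≤ remN graph s := by
            simpa using hrem0
          cases nxt with
          | nil =>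
              cases L <;> cases (fuelS - (n :: f').length) <;> rfl
          | cons a t =>
              apply ih
              · have : 1 ≤ (a :: t).length := by simp
                simp only [List.length_cons] at hrem ⊢
                omega
              · simp only [List.length_cons] at h2 hrem ⊢
                omega

theorem step_lock (graph : List (String × List (String × (String × String))))
    (goal node : String) (l : List (String × (String × String)))
    (pn : List String) :
    ∀ (prev : PySem.Dict String (Option String)) (parent : PySem.Dict String String)
      (seen : PySem.Set String) (q : List String),
    RepAB prev parent seen → Trace prev pn node → pn.Nodup → QTrace prev q →
    (match stepA goal node l prev q, l.foldl (discB node) (parent, seen, q) with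
     | (prev', q', false), (p', s', qB) =>
         qB = q' ∧ RepAB prev' p' s' ∧ prev'.get? goal = prev.get? goal ∧ QTrace prev' q'
     | (prev', _, true), (p', s', _) =>
         (∀ x v, prev'.get? x = some v → p'.get? x = v ∧ PySem.Set.contains s' x = true) ∧
         Trace prev' (pn ++ [goal]) goal ∧ (pn ++ [goal]).Nodup) := by
  induction l with
  | nil =>
      intro prev parent seen q hR hT hN hQ
      simp only [stepA, List.foldl_nil]
      exact ⟨by trivial, hR, by trivial, hQ⟩
  | cons e rest ih =>
      intro prev parent seen q hR hT hN hQ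
      obtain ⟨neigh, ec⟩ := e
      simp only [stepA, List.foldl_cons]
      cases hc : prev.contains neigh with
      | true =>
          rw [if_pos rfl]
          rw [discB_seen node parent seen q (neigh, ec) (by rw [hR.1 neigh]; exact hc)]
          exact ih prev parent seen q hR hT hN hQ
      | false =>
          rw [if_neg (by simp [hc])]
          rw [discB_fresh node parent seen q (neigh, ec) (by rw [hR.1 neigh]; exact hc)]
          have hRmid : RepAB (prev.insert neigh (some node))
              (parent.insert neigh node) (PySem.Set.add seen neigh) := by
            constructor
            · intro x
              rw [set_contains_add, PySem.Dict.contains_insert, hR.1 x]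
            · intro x
              by_cases hx : x = neigh
              · subst hx
                rw [PySem.Dict.get?_insert_self, PySem.Dict.get?_insert_self]
                rfl
              · rw [PySem.Dict.get?_insert_of_ne _ _ hx, PySem.Dict.get?_insert_of_ne _ _ hx]
                exact hR.2 x
          have hTmid : Trace (prev.insert neigh (some node)) pn node :=
            trace_mono hT neigh (some node) hc
          have hfresh : neigh ∉ pn := by
            intro hmem
            rw [trace_subset hT neigh hmem] at hc
            cases hc
          have hTnew : Trace (prev.insert neigh (some node)) (pn ++ [neigh]) neigh :=
            Trace.step pn node neigh hTmid (PySem.Dict.get?_insert_self _ _ _)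
          have hNnew : (pn ++ [neigh]).Nodup :=
            List.Nodup.append hN (List.nodup_singleton _)
              (by intro a ha hb; simp at hb; subst hb; exact hfresh ha)
          cases hg : (neigh == goal) with
          | true =>
              have hgoal : neigh = goal := by simpa using hg
              subst hgoal
              rw [if_pos rfl]
              rcases hfold : rest.foldl (discB node)
                  (parent.insert neigh node, PySem.Set.add seen neigh, q ++ [neigh])
                with ⟨p', s', qB⟩
              refine ⟨?_, hTnew, hNnew⟩
              intro x v hxv
              have hcmid : PySem.Set.contains (PySem.Set.add seen neigh) x = true := by
                rw [hRmid.1 x, PySem.Dict.contains_eq_isSome_get?, hxv]; rfl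
              have hgmid : (parent.insert neigh node).get? x = v := by
                rw [hRmid.2 x, hxv]; rfl
              have := fold_stable node rest (parent.insert neigh node)
                (PySem.Set.add seen neigh) (q ++ [neigh]) x hcmid
              rw [hfold] at this
              exact ⟨by rw [this.1, hgmid], this.2⟩
          | false =>
              rw [if_neg (by simpa using hg)]
              have hQnew : QTrace (prev.insert neigh (some node)) (q ++ [neigh]) := by
                intro m hm
                rcases List.mem_append.1 hm with h1 | h1
                · obtain ⟨pm, hpm, hnm⟩ := hQ m h1
                  exact ⟨pm, trace_mono hpm neigh (some node) hc, hnm⟩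
                · simp at h1
                  rw [h1]
                  exact ⟨pn ++ [neigh], hTnew, hNnew⟩
              have hih := ih (prev.insert neigh (some node)) (parent.insert neigh node)
                (PySem.Set.add seen neigh) (q ++ [neigh]) hRmid hTmid hN hQnew
              rcases hA : stepA goal node rest (prev.insert neigh (some node)) (q ++ [neigh])
                with ⟨prev', q', found⟩
              rcases hB : rest.foldl (discB node)
                  (parent.insert neigh node, PySem.Set.add seen neigh, q ++ [neigh])
                with ⟨p', s', qB⟩
              rw [hA, hB] at hih
              cases found with
              | true => exact hih
              | false =>
                  obtain ⟨h1, h2, h3, h4⟩ := hih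
                  refine ⟨h1, h2, ?_, h4⟩
                  rw [h3, PySem.Dict.get?_insert_of_ne]
                  intro he; subst he
                  simp at hg

theorem main_lock (graph : List (String × List (String × (String × String)))) (goal : String) :
    ∀ (fuelS fuelA : Nat) (q : List String) (prev : PySem.Dict String (Option String))
      (parent : PySem.Dict String String) (seen : PySem.Set String),
    RepAB prev parent seen → QTrace prev q → parent.get? goal = none →
    q.length + remN graph seen ≤ fuelA → q.length + remN graph seen ≤ fuelS →
    (match bfsA graph goal fuelA q prev with
     | none => (seqS graph fuelS q parent seen).get? goal = none
     | some prev' => ∃ ch, Trace prev' ch goal ∧ ch.Nodup ∧ 2 ≤ ch.length ∧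
         (∀ x v, prev'.get? x = some v → (seqS graph fuelS q parent seen).get? x = v)) := by
  intro fuelS
  induction fuelS with
  | zero =>
      intro fuelA q prev parent seen hR hQ hg hA hS
      cases q with
      | nil =>
          cases fuelA <;> simpa [bfsA, seqS] using hg
      | cons n q' => simp at hS
  | succ fS ih =>
      intro fuelA q prev parent seen hR hQ hg hA hS
      cases q with
      | nil => cases fuelA <;> simpa [bfsA, seqS] using hg
      | cons n q' =>
          cases fuelA with
          | zero => simp at hA
          | succ aA =>
              simp only [bfsA, seqS]
              obtain ⟨pn, hTn, hNn⟩ := hQ n (List.mem_cons_self ..)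
              have hQ' : QTrace prev q' := fun m hm => hQ m (List.mem_cons_of_mem _ hm)
              have hsl := step_lock graph goal n (pvGGet graph n) pn prev parent seen q'
                hR hTn hNn hQ'
              rcases hstA : stepA goal n (pvGGet graph n) prev q' with ⟨prev1, q1, found⟩
              rcases hstB : (pvGGet graph n).foldl (discB n) (parent, seen, q') with ⟨p1, s1, qB⟩
              rw [hstA, hstB] at hsl
              have hlev : levelStep graph (parent, seen, q') n = (p1, s1, qB) := hstB
              rw [hlev]
              have hrem0 := fold_rem graph n (pvGGet graph n)
                (fun e he => nb_mem graph n e he) parent seen q'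
              rw [hstB] at hrem0
              have hrem : remN graph s1 + qB.length ≤ remN graph seen + q'.length := by
                simpa using hrem0
              cases found with
              | true =>
                  obtain ⟨hE, hTg, hNg⟩ := hsl
                  refine ⟨pn ++ [goal], hTg, hNg, ?_, ?_⟩
                  · have := trace_one_le hTn
                    simp only [List.length_append, List.length_cons, List.length_nil]
                    omega
                  · intro x v hxv
                    obtain ⟨h1, h2⟩ := hE x v hxv
                    rw [seq_stable graph fS qB p1 s1 x h2, h1]
              | false =>
                  obtain ⟨hq, hR1, hgoal1, hQ1⟩ := hsl
                  subst hq
                  have hg1 : p1.get? goal = none := by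
                    rw [hR1.2 goal, hgoal1, ← hR.2 goal, hg]
                  have hA1 : qB.length + remN graph s1 ≤ aA := by
                    simp only [List.length_cons] at hA; omega
                  have hS1 : qB.length + remN graph s1 ≤ fS := by
                    simp only [List.length_cons] at hS; omega
                  exact ih aA qB prev1 p1 s1 hR1 hQ1 hg1 hA1 hS1

theorem chain_eq (pf : PySem.Dict String String) (prev' : PySem.Dict String (Option String))
    (E : ∀ x v, prev'.get? x = some v → pf.get? x = v) :
    ∀ (ch : List String) (g : String), Trace prev' ch g →
    ∃ r rest, ch = r :: rest ∧ (∀ y ∈ rest, y ∈ pf.keys) ∧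
    (∀ fuel : Nat, rest.length ≤ fuel → chainB pf fuel g = ch) := by
  intro ch g h
  induction h with
  | base x hx =>
      refine ⟨x, [], rfl, by simp, ?_⟩
      intro fuel _
      have hpf : pf.get? x = none := E x none hx
      cases fuel with
      | zero => rfl
      | succ f => simp [chainB, hpf]
  | step p x y ht hy ih =>
      obtain ⟨r, rest, hch, hkeys, hfn⟩ := ih
      have hpf : pf.get? y = some x := E y (some x) hy
      refine ⟨r, rest ++ [y], by rw [hch]; simp, ?_, ?_⟩
      · intro z hz
        rcases List.mem_append.1 hz with h1 | h1
        · exact hkeys z h1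
        · simp at h1; subst h1
          rw [← PySem.Dict.contains_iff_mem_keys,
            PySem.Dict.contains_eq_isSome_get?, hpf]
          rfl
      · intro fuel hf
        simp only [List.length_append, List.length_cons, List.length_nil] at hf
        cases fuel with
        | zero => omega
        | succ f =>
            simp only [chainB, hpf]
            rw [hfn f (by omega), hch]

theorem ofList_isEmpty (xs : List String) :
    (PySem.Set.ofList xs).isEmpty = xs.isEmpty := by
  cases xs with
  | nil => rfl
  | cons a t =>
      have ha : a ∈ PySem.Set.ofList (a :: t) := (PySem.Set.mem_ofList _ _).2 (List.mem_cons_self ..)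
      cases hof : PySem.Set.ofList (a :: t) with
      | nil => rw [hof] at ha; simp at ha
      | cons b u => simp

theorem outer_eq (graph : List (String × List (String × (String × String)))) :
    ∀ (rem path : List String) (cur : String),
    outerB graph rem path cur = outerA graph rem path cur := by
  intro rem
  induction rem with
  | nil => intro path cur; rfl
  | cons goal rest ih =>
      intro path cur
      simp only [outerA, outerB]
      have hR : RepAB ((PySem.Dict.empty : PySem.Dict String (Option String)).insert cur none)
          PySem.Dict.empty (PySem.Set.add PySem.Set.empty cur) := by
        constructor
        · intro x
          rw [set_contains_add, PySem.Dict.contains_insert]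
          by_cases hx : x = cur <;>
            simp [hx, PySem.Set.contains, PySem.Set.empty, PySem.Dict.contains_empty]
        · intro x
          by_cases hx : x = cur
          · subst hx
            rw [PySem.Dict.get?_insert_self]
            simp [PySem.Dict.get?_empty]
          · rw [PySem.Dict.get?_insert_of_ne _ _ hx]
            simp [PySem.Dict.get?_empty]
      have hQ : QTrace ((PySem.Dict.empty : PySem.Dict String (Option String)).insert cur none)
          [cur] := by
        intro m hm
        simp at hm
        rw [hm]
        exact ⟨[cur], Trace.base cur (PySem.Dict.get?_insert_self _ _ _),
          List.nodup_singleton _⟩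
      have hg0 : (PySem.Dict.empty : PySem.Dict String String).get? goal = none := by
        simp [PySem.Dict.get?_empty]
      have hfuel : ([cur] : List String).length
          + remN graph (PySem.Set.add PySem.Set.empty cur) ≤ pvFuel graph := by
        have := remN_le graph (PySem.Set.add PySem.Set.empty cur)
        simp only [List.length_cons, List.length_nil]
        omega
      have hmain := main_lock graph goal (pvFuel graph) (pvFuel graph) [cur]
        ((PySem.Dict.empty : PySem.Dict String (Option String)).insert cur none)
        PySem.Dict.empty (PySem.Set.add PySem.Set.empty cur) hR hQ hg0 hfuel hfuel
      have hlev := levels_eq_seq graph (pvFuel graph) [cur] PySem.Dict.empty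
        (PySem.Set.add PySem.Set.empty cur) (pvFuel graph)
        (by have := remN_le graph (PySem.Set.add PySem.Set.empty cur); omega) hfuel
      rw [hlev]
      cases hbfs : bfsA graph goal (pvFuel graph) [cur]
          ((PySem.Dict.empty : PySem.Dict String (Option String)).insert cur none) with
      | none =>
          rw [hbfs] at hmain
          have hcont : (seqS graph (pvFuel graph) [cur] PySem.Dict.empty
              (PySem.Set.add PySem.Set.empty cur)).contains goal = false := by
            rw [PySem.Dict.contains_eq_isSome_get?, hmain]
            rfl
          rw [hcont]
          simp
      | some prev' =>
          rw [hbfs] at hmain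
          obtain ⟨ch, hT, hNd, hlen2, hE⟩ := hmain
          have hw : ∃ w, prev'.get? goal = some (some w) := by
            cases hT with
            | base x hx => simp at hlen2
            | step p x y ht hy => exact ⟨x, hy⟩
          obtain ⟨w, hw⟩ := hw
          have hpfw : (seqS graph (pvFuel graph) [cur] PySem.Dict.empty
              (PySem.Set.add PySem.Set.empty cur)).get? goal = some w := hE goal (some w) hw
          have hcont : (seqS graph (pvFuel graph) [cur] PySem.Dict.empty
              (PySem.Set.add PySem.Set.empty cur)).contains goal = true := by
            rw [PySem.Dict.contains_eq_isSome_get?, hpfw]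
            rfl
          have hsub : ∀ y ∈ ch, y ∈ prev'.keys := fun y hy =>
            (PySem.Dict.contains_iff_mem_keys _ _).1 (trace_subset hT y hy)
          have hsize : ch.length ≤ prev'.size := by
            have := (hNd.subperm hsub).length_le
            simpa [PySem.Dict.size, PySem.Dict.keys] using this
          have hrec := trace_recA hT [] prev'.size hsize
          obtain ⟨r, restl, hch, hkeys, hfn⟩ := chain_eq
            (seqS graph (pvFuel graph) [cur] PySem.Dict.empty
              (PySem.Set.add PySem.Set.empty cur)) prev' hE ch goal hT
          have hrnodup : restl.Nodup := by
            rw [hch] at hNd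
            exact (List.nodup_cons.mp hNd).2
          have hrlen : restl.length ≤ (seqS graph (pvFuel graph) [cur] PySem.Dict.empty
              (PySem.Set.add PySem.Set.empty cur)).size := by
            have := (hrnodup.subperm (fun y hy => hkeys y hy)).length_le
            simpa [PySem.Dict.size, PySem.Dict.keys] using this
          have hchainB := hfn _ hrlen
          change (if (seqS graph (pvFuel graph) [cur] PySem.Dict.empty
              (PySem.Set.add PySem.Set.empty cur)).contains goal = true then
                outerB graph rest (path ++ List.drop 1 (chainB
                  (seqS graph (pvFuel graph) [cur] PySem.Dict.empty
                    (PySem.Set.add PySem.Set.empty cur))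
                  (seqS graph (pvFuel graph) [cur] PySem.Dict.empty
                    (PySem.Set.add PySem.Set.empty cur)).size goal)) goal
              else none)
            = outerA graph rest
                (path ++ List.drop 1 (recA prev' prev'.size (some goal) []).reverse) goal
          rw [hcont, hchainB, hrec, if_pos rfl]
          simp only [List.nil_append, List.reverse_reverse]
          exact ih _ goal

-- ===== VERDICT (by name: the statement is the Claim_ definition above) =====
theorem find_join_path_py_spec : Claim_equal_find_join_path_py := by
  intro graph start targets _
  unfold Spec_find_join_path_py find_join_path_py find_join_path_py_alt
  rw [ofList_isEmpty]
  by_cases h : targets.isEmpty <;> simp [h, outer_eq]
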